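-- pv_equiv track=rewrite | github.com/PhotonicGluon/Intro-To-Competitive-Programming | Course Files/01 - Basics and Ad Hoc Problems/Solutions/PrimeBuzz.py | prime_buzz
-- ===== SOURCE A (Python) =====
-- def prime_buzz(n):
--     # Finding Primes
--     prime = [True for i in range(n + 1)]
--     p = 2
--
--     while (p * p <= n):
--         # If `prime[p]` is not changed, then it is a prime
--         if (prime[p] == True):
--             # Update all multiples of `p`
--             for i in range(p * p, n + 1, p):
--                 prime[i] = False
--
--         # Increment current number by 1
--         p += 1
--
--     # Get all the primes
--     primes = set()
--     for i in range(2, n + 1):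
--         if prime[i]:
--             primes.add(i)
--
--     # Get all the buzzes & primebuzzes
--     buzzes = set()
--     primebuzzes = set()
--
--     for i in range(1, n + 1):
--         if str(i) == str(i)[::-1]:
--             if prime[i]:
--                 primebuzzes.add(i)
--                 primes.discard(i)
--             else:
--                 buzzes.add(i)
--
--     # Return K
--     return len(primes) * len(buzzes) * len(primebuzzes)
-- ===== SOURCE B (Python) =====
-- def prime_buzz(n):
--     # Same value as A: counts are kept in three integer counters in one
--     # classification pass; palindromes are detected by arithmetic digit
--     # reversal instead of building and reversing strings; no sets, no discard.
--     if n < 1: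
--         return 0
--
--     # Sieve of Eratosthenes (prime[1] stays True, as in A).
--     prime = [True] * (n + 1)
--     p = 2
--     while p * p <= n:
--         if prime[p]:
--             for i in range(p * p, n + 1, p):
--                 prime[i] = False
--         p += 1
--
--     primebuzz = buzz = onlyprime = 0
--     for i in range(1, n + 1):
--         rev, t = 0, i
--         while t > 0:
--             rev = rev * 10 + t % 10
--             t //= 10
--         if rev == i:
--             if prime[i]:
--                 primebuzz += 1
--             else:
--                 buzz += 1
--         elif prime[i]:
--             onlyprime += 1
--     return onlyprime * buzz * primebuzz
-- ===== Notes on version B (the rewrite author's own statement) =====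
-- stated objective: alternative
-- what changed: Replaces A's three Python sets, the extra prime-collecting pass and the string-reversal palindrome test with a single classification pass keeping three integer counters and an arithmetic digit-reversal palindrome test (the sieve itself is kept).
import Mathlib
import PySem

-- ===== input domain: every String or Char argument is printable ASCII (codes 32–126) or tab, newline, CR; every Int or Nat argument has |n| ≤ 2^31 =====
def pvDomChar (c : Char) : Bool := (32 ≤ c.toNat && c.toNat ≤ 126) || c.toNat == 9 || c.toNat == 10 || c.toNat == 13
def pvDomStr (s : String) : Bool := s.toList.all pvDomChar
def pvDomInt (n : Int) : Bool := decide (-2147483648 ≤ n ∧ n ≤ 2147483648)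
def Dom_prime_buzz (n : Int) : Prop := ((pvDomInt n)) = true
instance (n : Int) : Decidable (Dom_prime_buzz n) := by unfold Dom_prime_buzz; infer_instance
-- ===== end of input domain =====

-- B replaces A's three sets, extra prime-collecting pass and string-reversal palindrome test by one
-- counting pass with an arithmetic digit-reversal palindrome test (return value only; similar cost).

-- ===== PORT A =====
-- the inner `for i in range(p*p, n+1, p): prime[i] = False`
def pvSieveInner (n p : Int) (pr : List Bool) : List Bool :=
  (PySem.List.pyRange (p * p) (n + 1) p).foldl (fun pr i => PySem.List.pySetD pr i false) pr

-- the `while p*p <= n` loop of the sieve (p only ever takes the values 2,3,…, kept as a Nat counter)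
def pvSieveLoop (n : Int) (p : Nat) (pr : List Bool) : List Bool :=
  if h : ((p : Int) * (p : Int)) ≤ n then
    pvSieveLoop n (p + 1)
      (if PySem.List.pyGetD pr (p : Int) false then pvSieveInner n (p : Int) pr else pr)
  else pr
termination_by (n + 1 - (p : Int)).toNat
decreasing_by
  rcases Nat.eq_zero_or_pos p with hp | hp
  · subst hp; simp at h ⊢; omega
  · have h1 : (1 : Int) ≤ (p : Int) := by exact_mod_cast hp
    have h2 : (p : Int) ≤ (p : Int) * (p : Int) := le_mul_of_one_le_left (by omega) h1
    omega

def prime_buzz (n : Int) : Int :=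
  let prime0 := (PySem.List.pyRange 0 (n + 1) 1).map (fun _ => true)
  let prime := pvSieveLoop n 2 prime0
  let primes : PySem.Set Int := (PySem.List.pyRange 2 (n + 1) 1).foldl
    (fun s i => if PySem.List.pyGetD prime i false then PySem.Set.add s i else s) PySem.Set.empty
  let st := (PySem.List.pyRange 1 (n + 1) 1).foldl
    (fun (st : PySem.Set Int × PySem.Set Int × PySem.Set Int) i =>
      if PySem.Int.toChars i = (PySem.Int.toChars i).reverse then
        if PySem.List.pyGetD prime i false then
          (PySem.Set.discard st.1 i, st.2.1, PySem.Set.add st.2.2 i)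
        else
          (st.1, PySem.Set.add st.2.1 i, st.2.2)
      else st)
    (primes, PySem.Set.empty, PySem.Set.empty)
  PySem.Set.len st.1 * PySem.Set.len st.2.1 * PySem.Set.len st.2.2

-- ===== PORT B =====
-- the `while t > 0: rev = rev*10 + t%10; t //= 10` digit-reversal loop
def pvRev (t acc : Int) : Int :=
  if h : 0 < t then pvRev (PySem.Int.floordiv t 10) (acc * 10 + PySem.Int.mod t 10) else acc
termination_by t.toNat
decreasing_by
  have h1 := PySem.Int.floordiv_eq_ediv_of_pos (a := t) (b := 10) (by omega)
  omega

def prime_buzz_alt (n : Int) : Int :=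
  if n < 1 then 0
  else
    let prime0 := List.replicate (n + 1).toNat true
    let prime := pvSieveLoop n 2 prime0
    let c := (PySem.List.pyRange 1 (n + 1) 1).foldl
      (fun (c : Int × Int × Int) i =>
        if pvRev i 0 = i then
          if PySem.List.pyGetD prime i false then (c.1 + 1, c.2.1, c.2.2)
          else (c.1, c.2.1 + 1, c.2.2)
        else if PySem.List.pyGetD prime i false then (c.1, c.2.1, c.2.2 + 1) else c)
      (0, 0, 0)
    c.2.2 * c.2.1 * c.1

-- ===== PRECONDITION & SPEC =====
def Spec_prime_buzz (n : Int) (out : Int) : Prop := out = prime_buzz_alt n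
instance (n : Int) (out : Int) : Decidable (Spec_prime_buzz n out) := by unfold Spec_prime_buzz; infer_instance

-- ===== CLAIM (what is proved, stated in full; the proofs are below) =====
def Claim_equal_prime_buzz : Prop := ∀ (n : Int), Dom_prime_buzz n → Spec_prime_buzz n (prime_buzz n)

-- ===== LEMMAS AND PROOFS =====

-- the two palindrome tests, named for the proofs
def pvPalS (i : Int) : Bool := decide (PySem.Int.toChars i = (PySem.Int.toChars i).reverse)
def pvPalN (i : Int) : Bool := decide (pvRev i 0 = i)

-- ---- digit-reversal characterisation ----
lemma pv_toDigitsCore_eq (f : Nat) : ∀ (m : Nat) (ds : List Char), 0 < m → m < f →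
    Nat.toDigitsCore 10 f m ds = ((Nat.digits 10 m).map Nat.digitChar).reverse ++ ds := by
  induction f with
  | zero => intro m ds h1 h2; omega
  | succ f ih =>
    intro m ds h1 h2
    rw [Nat.toDigitsCore]
    rw [Nat.digits_def' (by norm_num : (1:Nat) < 10) h1]
    by_cases h : m / 10 = 0
    · rw [if_pos h, h]
      simp
    · rw [if_neg h, ih (m / 10) _ (Nat.pos_of_ne_zero h) (by omega)]
      simp

lemma pv_toChars_eq (m : Nat) (hm : 0 < m) :
    PySem.Int.toChars (m : Int) = ((Nat.digits 10 m).map Nat.digitChar).reverse := by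
  rw [PySem.Int.toChars]
  rw [if_neg (by omega)]
  simp only [Int.toNat_natCast]
  rw [Nat.toDigits, pv_toDigitsCore_eq (m + 1) m [] hm (by omega)]
  simp

lemma pv_rev_eq (m : Nat) : ∀ acc : Int,
    pvRev (m : Int) acc = acc * 10 ^ (Nat.digits 10 m).length
      + (Nat.ofDigits 10 (Nat.digits 10 m).reverse : Nat) := by
  induction m using Nat.strong_induction_on with
  | _ m ih =>
    intro acc
    rcases Nat.eq_zero_or_pos m with rfl | hm
    · rw [pvRev]; simp
    · rw [pvRev, dif_pos (by exact_mod_cast hm)]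
      have hfd : PySem.Int.floordiv (↑m) 10 = ((m / 10 : Nat) : Int) := by
        exact_mod_cast PySem.Int.floordiv_natCast m 10
      have hmd : PySem.Int.mod (↑m) 10 = ((m % 10 : Nat) : Int) := by
        exact_mod_cast PySem.Int.mod_natCast m 10
      rw [hfd, hmd]
      rw [ih (m / 10) (Nat.div_lt_self hm (by norm_num))]
      rw [Nat.digits_def' (by norm_num : (1:Nat) < 10) hm]
      simp only [List.reverse_cons, List.length_cons, Nat.ofDigits_append, Nat.ofDigits_singleton,
        List.length_reverse]
      push_cast
      ring

lemma pv_pal_digits (m : Nat) (hm : 0 < m) :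
    (pvRev (m : Int) 0 = (m : Int)) ↔ Nat.digits 10 m = (Nat.digits 10 m).reverse := by
  rw [pv_rev_eq m 0]
  simp only [zero_mul, zero_add]
  constructor
  · intro h
    have hnat : Nat.ofDigits 10 (Nat.digits 10 m).reverse = m := by exact_mod_cast h
    rcases hL : Nat.digits 10 m with _ | ⟨d, L'⟩
    · exact absurd (Nat.digits_eq_nil_iff_eq_zero.mp hL) (by omega)
    · by_cases hd : d = 0
      · exfalso
        subst hd
        have h1 : Nat.ofDigits 10 ((0 :: L').reverse) = Nat.ofDigits 10 L'.reverse := by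
          simp [Nat.ofDigits_append_zero]
        have h2 : Nat.ofDigits 10 L'.reverse < 10 ^ L'.length := by
          have := Nat.ofDigits_lt_base_pow_length (b := 10) (l := L'.reverse)
            (by norm_num) ?_
          · simpa using this
          · intro x hx
            exact Nat.digits_lt_base (by norm_num) (by rw [hL]; simp [List.mem_reverse.mp hx])
        have h3 : 10 ^ L'.length ≤ m := by
          have := (Nat.lt_digits_length_iff (b := 10) (k := L'.length) (by norm_num) m).mp
            (by rw [hL]; simp)
          exact this
        rw [hL] at hnat
        omega
      · have := Nat.digits_ofDigits 10 (by norm_num) (d :: L').reverse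
          (fun x hx => Nat.digits_lt_base (by norm_num) (by rw [hL]; exact List.mem_reverse.mp hx))
          (by
            intro hne
            rw [List.getLast_reverse]
            exact hd)
        rw [hL] at hnat
        rw [hnat] at this
        rw [hL] at this
        exact this
  · intro h
    rw [← h, Nat.ofDigits_digits]

lemma pv_digitChar_inv (d : Nat) (hd : d < 10) : (Nat.digitChar d).toNat - 48 = d := by
  interval_cases d <;> rfl

lemma pv_map_digitChar_pal (L : List Nat) (hL : ∀ d ∈ L, d < 10) :
    (L.map Nat.digitChar = (L.map Nat.digitChar).reverse) ↔ L = L.reverse := by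
  constructor
  · intro h
    rw [← List.map_reverse] at h
    have h2 := congrArg (List.map (fun c : Char => c.toNat - 48)) h
    rw [List.map_map, List.map_map] at h2
    have e1 : List.map ((fun c : Char => c.toNat - 48) ∘ Nat.digitChar) L = L := by
      rw [show ((fun c : Char => c.toNat - 48) ∘ Nat.digitChar) = (fun x : Nat => (Nat.digitChar x).toNat - 48) from rfl]
      rw [List.map_congr_left (fun x hx => pv_digitChar_inv x (hL x hx)), List.map_id']
    have e2 : List.map ((fun c : Char => c.toNat - 48) ∘ Nat.digitChar) L.reverse = L.reverse := by
      rw [show ((fun c : Char => c.toNat - 48) ∘ Nat.digitChar) = (fun x : Nat => (Nat.digitChar x).toNat - 48) from rfl]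
      rw [List.map_congr_left (fun x hx => pv_digitChar_inv x (hL x (List.mem_reverse.mp hx))), List.map_id']
    rwa [e1, e2] at h2
  · intro h; rw [← List.map_reverse, ← h]

-- the string palindrome test of A and the arithmetic one of B agree on positive ints
lemma pv_pal_eq (i : Int) (hi : 1 ≤ i) : pvPalS i = pvPalN i := by
  obtain ⟨m, rfl⟩ : ∃ m : Nat, i = (m : Int) := ⟨i.toNat, (Int.toNat_of_nonneg (by omega)).symm⟩
  have hm : 0 < m := by exact_mod_cast hi
  have hdig : ∀ d ∈ Nat.digits 10 m, d < 10 := fun d hd => Nat.digits_lt_base (by norm_num) hd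
  rw [pvPalS, pvPalN]
  apply decide_eq_decide.mpr
  rw [pv_toChars_eq m hm, List.reverse_reverse, pv_pal_digits m hm]
  constructor
  · intro h
    exact (pv_map_digitChar_pal _ hdig).mp h.symm
  · intro h
    exact ((pv_map_digitChar_pal _ hdig).mpr h).symm

-- ---- pyRange facts ----
lemma pv_pyRange_eq_nil {a b : Int} (h : b ≤ a) : PySem.List.pyRange a b 1 = [] := by
  apply List.eq_nil_iff_forall_not_mem.mpr
  intro x hx
  have := PySem.List.mem_pyRange_one.mp hx
  omega

lemma pv_nodup_pyRange2 (b : Int) : ∀ (k : Nat) (a : Int), (b - a).toNat ≤ k →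
    (PySem.List.pyRange a b 1).Nodup := by
  intro k
  induction k with
  | zero => intro a h; rw [pv_pyRange_eq_nil (by omega)]; exact List.nodup_nil
  | succ k ih =>
    intro a h
    rcases le_or_gt b a with hba | hba
    · rw [pv_pyRange_eq_nil hba]; exact List.nodup_nil
    · rw [PySem.List.pyRange_one_cons hba]
      refine List.nodup_cons.mpr ⟨?_, ih (a + 1) (by omega)⟩
      intro hmem
      have := PySem.List.mem_pyRange_one.mp hmem
      omega

lemma pv_nodup_pyRange (a b : Int) : (PySem.List.pyRange a b 1).Nodup :=
  pv_nodup_pyRange2 b (b - a).toNat a le_rfl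

-- ---- the set-building pass of A is a filter ----
lemma pv_setbuild (p : Int → Bool) : ∀ (l : List Int) (s : List Int), l.Nodup → (∀ i ∈ l, i ∉ s) →
    l.foldl (fun s i => if p i then PySem.Set.add s i else s) s = s ++ l.filter p := by
  intro l
  induction l with
  | nil => simp
  | cons x t ih =>
    intro s hnd hdisj
    have hx : x ∉ s := hdisj x (by simp)
    have hadd : PySem.Set.add s x = s ++ [x] := by
      simp [PySem.Set.add, PySem.Set.contains]
      intro h; exact absurd h hx
    simp only [List.foldl_cons]
    by_cases hp : p x = true
    · rw [hp, if_pos rfl, hadd, ih (s ++ [x]) hnd.of_cons]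
      · simp [hp]
      · intro i hi
        simp only [List.mem_append, List.mem_singleton]
        rintro (h | rfl)
        · exact hdisj i (by simp [hi]) h
        · exact (List.nodup_cons.mp hnd).1 hi
    · rw [if_neg hp, ih s hnd.of_cons (fun i hi => hdisj i (by simp [hi]))]
      simp [hp]

-- ---- the classification loop of A, tracked as filters ----
lemma pv_loopA (pal pp : Int → Bool) (P0 : List Int) (hP0 : ∀ j ∈ P0, pp j = true) :
    ∀ (l done : List Int), l.Nodup → (∀ i ∈ l, i ∉ done) →
    l.foldl
      (fun (st : PySem.Set Int × PySem.Set Int × PySem.Set Int) i =>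
        if pal i = true then
          if pp i = true then (PySem.Set.discard st.1 i, st.2.1, PySem.Set.add st.2.2 i)
          else (st.1, PySem.Set.add st.2.1 i, st.2.2)
        else st)
      (P0.filter (fun j => !(pal j && done.contains j)),
       done.filter (fun j => pal j && !pp j),
       done.filter (fun j => pal j && pp j))
    = (P0.filter (fun j => !(pal j && (done ++ l).contains j)),
       (done ++ l).filter (fun j => pal j && !pp j),
       (done ++ l).filter (fun j => pal j && pp j)) := by
  intro l
  induction l with
  | nil => intro done _ _; simp
  | cons i t ih =>
    intro done hnd hdisj
    have hid : i ∉ done := hdisj i (by simp)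
    have hit : i ∉ t := (List.nodup_cons.mp hnd).1
    have hdisj' : ∀ j ∈ t, j ∉ done ++ [i] := by
      intro j hj
      simp only [List.mem_append, List.mem_singleton]
      rintro (h | rfl)
      · exact hdisj j (by simp [hj]) h
      · exact hit hj
    have hstep : (done ++ i :: t) = (done ++ [i]) ++ t := by simp
    rw [hstep]
    rw [← ih (done ++ [i]) (List.nodup_cons.mp hnd).2 hdisj']
    simp only [List.foldl_cons]
    congr 1
    by_cases h1 : pal i = true
    · by_cases h2 : pp i = true
      · rw [if_pos h1, if_pos h2]
        congr 1
        · rw [PySem.Set.discard, List.filter_filter]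
          apply List.filter_congr
          intro j hj
          simp only [List.contains_eq_mem, List.mem_append, List.mem_singleton]
          by_cases hji : j = i
          · subst hji; simp [h1]
          · simp [hji]
        congr 1
        · rw [List.filter_append]
          simp [h1, h2]
        · rw [PySem.Set.add, PySem.Set.contains, if_neg]
          · rw [List.filter_append]
            simp [h1, h2]
          · simp only [List.contains_eq_mem, decide_eq_true_eq]
            intro hmem
            exact hid (List.mem_of_mem_filter hmem)
      · rw [if_pos h1, if_neg h2]
        congr 1
        · apply List.filter_congr
          intro j hj
          simp only [List.contains_eq_mem, List.mem_append, List.mem_singleton]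
          by_cases hji : j = i
          · subst hji; exact absurd (hP0 j hj) h2
          · simp [hji]
        congr 1
        · rw [PySem.Set.add, PySem.Set.contains, if_neg]
          · rw [List.filter_append]
            simp [h1, h2]
          · simp only [List.contains_eq_mem, decide_eq_true_eq]
            intro hmem
            exact hid (List.mem_of_mem_filter hmem)
        · rw [List.filter_append]
          simp [h1, h2]
    · rw [if_neg h1]
      congr 1
      · apply List.filter_congr
        intro j hj
        simp only [List.contains_eq_mem, List.mem_append, List.mem_singleton]
        by_cases hji : j = i
        · subst hji; simp [h1]
        · simp [hji]
      congr 1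
      · rw [List.filter_append]; simp [h1]
      · rw [List.filter_append]; simp [h1]

-- ---- the counting loop of B ----
lemma pv_loopB (pal pp : Int → Bool) (l : List Int) : ∀ (a b c : Int),
    l.foldl
      (fun (c : Int × Int × Int) i =>
        if pal i = true then
          if pp i = true then (c.1 + 1, c.2.1, c.2.2) else (c.1, c.2.1 + 1, c.2.2)
        else if pp i = true then (c.1, c.2.1, c.2.2 + 1) else c)
      (a, b, c)
    = (a + (l.countP (fun i => pal i && pp i) : Int),
       b + (l.countP (fun i => pal i && !pp i) : Int),
       c + (l.countP (fun i => !pal i && pp i) : Int)) := by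
  induction l with
  | nil => simp
  | cons x t ih =>
    intro a b c
    simp only [List.foldl_cons, List.countP_cons]
    by_cases h1 : pal x = true <;> by_cases h2 : pp x = true <;>
      simp [h1, h2, ih] <;> ring

lemma pv_palN_one : pvPalN 1 = true := by
  rw [pvPalN, show (1 : Int) = ((1 : Nat) : Int) from rfl, pv_rev_eq 1 0]
  simp

-- ===== VERDICT (by name: the statement is the Claim_ definition above) =====
theorem prime_buzz_spec : Claim_equal_prime_buzz := by
  intro n _
  unfold Spec_prime_buzz
  simp only [prime_buzz, prime_buzz_alt]
  by_cases hn : n < 1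
  · rw [if_pos hn]
    rw [pv_pyRange_eq_nil (show n + 1 ≤ 2 by omega), pv_pyRange_eq_nil (show n + 1 ≤ 1 by omega)]
    simp [PySem.Set.len, PySem.Set.empty]
  · rw [if_neg hn]
    -- the two sieve inputs are the same list
    have hinit : (PySem.List.pyRange 0 (n + 1) 1).map (fun _ => true)
        = List.replicate (n + 1).toNat true := by
      rw [show n + 1 = (((n + 1).toNat : Nat) : Int) by omega, PySem.List.pyRange_zero_natCast]
      rw [List.map_map]
      apply List.eq_replicate_iff.mpr
      refine ⟨by simp; omega, ?_⟩
      intro b hb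
      simp only [List.mem_map] at hb
      obtain ⟨x, _, rfl⟩ := hb
      rfl
    rw [hinit]
    set pr := pvSieveLoop n 2 (List.replicate (n + 1).toNat true) with hpr
    have hr1 : 1 < n + 1 := by omega
    have hrange1 : PySem.List.pyRange 1 (n + 1) 1 = 1 :: PySem.List.pyRange 2 (n + 1) 1 :=
      PySem.List.pyRange_one_cons hr1
    -- A's first pass builds the filter of the sieve
    have hbuild : (PySem.List.pyRange 2 (n + 1) 1).foldl
        (fun s i => if PySem.List.pyGetD pr i false = true then PySem.Set.add s i else s)
        PySem.Set.empty
        = (PySem.List.pyRange 2 (n + 1) 1).filter (fun i => PySem.List.pyGetD pr i false) := by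
      have h := pv_setbuild (fun i => PySem.List.pyGetD pr i false)
        (PySem.List.pyRange 2 (n + 1) 1) [] (pv_nodup_pyRange _ _) (by simp)
      simpa using h
    rw [hbuild]
    set P0 : List Int :=
      (PySem.List.pyRange 2 (n + 1) 1).filter (fun i => PySem.List.pyGetD pr i false) with hP0def
    have hP0 : ∀ j ∈ P0, PySem.List.pyGetD pr j false = true := by
      intro j hj
      exact (List.mem_filter.mp hj).2
    -- rewrite A's classification fold into the canonical shape
    have hfunA : (fun (st : PySem.Set Int × PySem.Set Int × PySem.Set Int) i =>
        if PySem.Int.toChars i = (PySem.Int.toChars i).reverse then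
          if PySem.List.pyGetD pr i false = true then
            (PySem.Set.discard st.1 i, st.2.1, PySem.Set.add st.2.2 i)
          else (st.1, PySem.Set.add st.2.1 i, st.2.2)
        else st)
        = (fun (st : PySem.Set Int × PySem.Set Int × PySem.Set Int) i =>
        if pvPalS i = true then
          if PySem.List.pyGetD pr i false = true then
            (PySem.Set.discard st.1 i, st.2.1, PySem.Set.add st.2.2 i)
          else (st.1, PySem.Set.add st.2.1 i, st.2.2)
        else st) := by
      funext st i
      by_cases h : PySem.Int.toChars i = (PySem.Int.toChars i).reverse
      · have hp : pvPalS i = true := by rw [pvPalS]; exact decide_eq_true h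
        rw [if_pos h, hp, if_pos rfl]
      · have hp : pvPalS i = false := by rw [pvPalS]; exact decide_eq_false h
        rw [if_neg h, hp]
        rfl
    have hfunB : (fun (c : Int × Int × Int) i =>
        if pvRev i 0 = i then
          if PySem.List.pyGetD pr i false = true then (c.1 + 1, c.2.1, c.2.2)
          else (c.1, c.2.1 + 1, c.2.2)
        else if PySem.List.pyGetD pr i false = true then (c.1, c.2.1, c.2.2 + 1) else c)
        = (fun (c : Int × Int × Int) i =>
        if pvPalN i = true then
          if PySem.List.pyGetD pr i false = true then (c.1 + 1, c.2.1, c.2.2)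
          else (c.1, c.2.1 + 1, c.2.2)
        else if PySem.List.pyGetD pr i false = true then (c.1, c.2.1, c.2.2 + 1) else c) := by
      funext c i
      by_cases h : pvRev i 0 = i
      · have hp : pvPalN i = true := by rw [pvPalN]; exact decide_eq_true h
        rw [if_pos h, hp, if_pos rfl]
      · have hp : pvPalN i = false := by rw [pvPalN]; exact decide_eq_false h
        rw [if_neg h, hp]
        rfl
    rw [hfunA, hfunB]
    have hstart : ((P0, PySem.Set.empty, PySem.Set.empty) :
        PySem.Set Int × PySem.Set Int × PySem.Set Int)
        = (P0.filter (fun j => !(pvPalS j && ([] : List Int).contains j)),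
           ([] : List Int).filter (fun j => pvPalS j && !(PySem.List.pyGetD pr j false)),
           ([] : List Int).filter (fun j => pvPalS j && PySem.List.pyGetD pr j false)) := by
      simp
    rw [hstart]
    have hA := pv_loopA pvPalS (fun i => PySem.List.pyGetD pr i false) P0 hP0
      (PySem.List.pyRange 1 (n + 1) 1) [] (pv_nodup_pyRange _ _) (by simp)
    beta_reduce at hA
    rw [hA]
    have hB := pv_loopB pvPalN (fun i => PySem.List.pyGetD pr i false)
      (PySem.List.pyRange 1 (n + 1) 1) 0 0 0
    beta_reduce at hB
    rw [hB]
    simp only [List.nil_append, zero_add]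
    -- positive members
    have hmem1 : ∀ i ∈ PySem.List.pyRange 1 (n + 1) 1, 1 ≤ i := by
      intro i hi
      exact (PySem.List.mem_pyRange_one.mp hi).1
    -- B's three counts, with pvPalN replaced by pvPalS
    have hcnt1 : (PySem.List.pyRange 1 (n + 1) 1).countP
          (fun i => pvPalN i && PySem.List.pyGetD pr i false)
        = (PySem.List.pyRange 1 (n + 1) 1).countP
          (fun i => pvPalS i && PySem.List.pyGetD pr i false) :=
      List.countP_congr (fun i hi => by rw [pv_pal_eq i (hmem1 i hi)])
    have hcnt2 : (PySem.List.pyRange 1 (n + 1) 1).countP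
          (fun i => pvPalN i && !(PySem.List.pyGetD pr i false))
        = (PySem.List.pyRange 1 (n + 1) 1).countP
          (fun i => pvPalS i && !(PySem.List.pyGetD pr i false)) :=
      List.countP_congr (fun i hi => by rw [pv_pal_eq i (hmem1 i hi)])
    have hcnt3 : (PySem.List.pyRange 1 (n + 1) 1).countP
          (fun i => !pvPalN i && PySem.List.pyGetD pr i false)
        = (PySem.List.pyRange 1 (n + 1) 1).countP
          (fun i => !pvPalS i && PySem.List.pyGetD pr i false) :=
      List.countP_congr (fun i hi => by rw [pv_pal_eq i (hmem1 i hi)])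
    -- A's first factor equals B's third count
    have hfac1 : (P0.filter
        (fun j => !(pvPalS j && (PySem.List.pyRange 1 (n + 1) 1).contains j))).length
        = (PySem.List.pyRange 1 (n + 1) 1).countP
          (fun i => !pvPalS i && PySem.List.pyGetD pr i false) := by
      have hcg : P0.filter
          (fun j => !(pvPalS j && (PySem.List.pyRange 1 (n + 1) 1).contains j))
          = P0.filter (fun j => !pvPalS j) := by
        apply List.filter_congr
        intro j hj
        have := PySem.List.mem_pyRange_one.mp (List.mem_of_mem_filter hj)
        have hmem : j ∈ PySem.List.pyRange 1 (n + 1) 1 :=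
          PySem.List.mem_pyRange_one.mpr (by omega)
        simp [List.contains_eq_mem, hmem]
      rw [hcg, hP0def, List.filter_filter, hrange1, List.countP_cons]
      have hone : (!pvPalS 1 && PySem.List.pyGetD pr 1 false) = false := by
        rw [pv_pal_eq 1 le_rfl, pv_palN_one]
        rfl
      rw [hone, if_neg (by decide), Nat.add_zero, List.countP_eq_length_filter]
    -- A's other two factors are the filter forms of B's counts
    have hfac2 : ((PySem.List.pyRange 1 (n + 1) 1).filter
        (fun j => pvPalS j && !(PySem.List.pyGetD pr j false))).length
        = (PySem.List.pyRange 1 (n + 1) 1).countP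
          (fun i => pvPalS i && !(PySem.List.pyGetD pr i false)) := by
      rw [List.countP_eq_length_filter]
    have hfac3 : ((PySem.List.pyRange 1 (n + 1) 1).filter
        (fun j => pvPalS j && PySem.List.pyGetD pr j false)).length
        = (PySem.List.pyRange 1 (n + 1) 1).countP
          (fun i => pvPalS i && PySem.List.pyGetD pr i false) := by
      rw [List.countP_eq_length_filter]
    simp only [PySem.Set.len]
    rw [hfac1, hfac2, hfac3, hcnt1, hcnt2, hcnt3]
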